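-- pv_equiv track=rewrite | github.com/greivinlopez/coding-solutions | python/leetcode/problems_1300_1399/1318_minimum_flips_to_make_a_or_b_equal_to_c.py | min_flips
-- ===== SOURCE A (Python) =====
-- def min_flips(a, b, c):
--     flip_count = 0
--
--     # Check each bit position (32-bit integers)
--     for bit_position in range(32):
--         # Extract the i-th bit from each number
--         bit_a = (a >> bit_position) & 1
--         bit_b = (b >> bit_position) & 1
--         bit_c = (c >> bit_position) & 1
--
--         # Calculate flips needed for current bit position
--         if bit_c == 0:
--             # If target bit is 0, both a and b bits must be 0
--             # Count how many 1s need to be flipped to 0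
--             flip_count += bit_a + bit_b
--         else:
--             # If target bit is 1, at least one of a or b must be 1
--             # Only flip if both are 0
--             flip_count += int(bit_a == 0 and bit_b == 0)
--
--     return flip_count
-- ===== SOURCE B (Python) =====
-- def min_flips(a, b, c):
--     mask = (1 << 32) - 1
--     # flips where (a|b) disagrees with c, plus one extra where both a and b
--     # are 1 while c's bit is 0 (two 1s must be cleared there)
--     return (((a | b) ^ c) & mask).bit_count() + (a & b & ~c & mask).bit_count()
-- ===== Notes on version B (the rewrite author's own statement) =====
-- stated objective: idiomatic
-- what changed: Replaced the 32-iteration per-bit loop with a closed-form bit trick: popcount of ((a|b)^c) masked to 32 bits plus popcount of (a&b&~c) masked to 32 bits.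
import Mathlib
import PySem

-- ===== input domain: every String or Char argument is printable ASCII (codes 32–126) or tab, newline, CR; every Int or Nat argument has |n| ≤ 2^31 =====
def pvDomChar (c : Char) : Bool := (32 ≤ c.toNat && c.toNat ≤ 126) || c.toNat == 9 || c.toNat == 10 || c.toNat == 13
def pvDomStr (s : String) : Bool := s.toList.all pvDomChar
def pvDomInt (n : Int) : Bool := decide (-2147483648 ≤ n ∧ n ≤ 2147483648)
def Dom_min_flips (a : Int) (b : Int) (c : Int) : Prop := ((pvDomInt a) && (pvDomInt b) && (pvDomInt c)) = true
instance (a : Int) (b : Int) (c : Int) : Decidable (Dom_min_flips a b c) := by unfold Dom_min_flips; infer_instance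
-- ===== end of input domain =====

-- B replaces A's 32-iteration per-bit loop by one closed-form word-level expression:
-- popcount(((a|b)^c) & mask) + popcount((a&b&~c) & mask) with mask = 2^32-1.


-- ===== PORT A =====
def min_flips (a : Int) (b : Int) (c : Int) : Int :=
  (PySem.List.pyRange 0 32 1).foldl (fun flip_count bit_position =>
    let bit_a := PySem.Int.band (a >>> bit_position.toNat) 1
    let bit_b := PySem.Int.band (b >>> bit_position.toNat) 1
    let bit_c := PySem.Int.band (c >>> bit_position.toNat) 1
    if bit_c = 0 then flip_count + (bit_a + bit_b)
    else flip_count + (if bit_a = 0 ∧ bit_b = 0 then 1 else 0)) 0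

-- ===== PORT B =====
def min_flips_alt (a : Int) (b : Int) (c : Int) : Int :=
  let mask : Int := ((1 : Int) <<< (32 : Nat)) - 1
  ((PySem.Int.bitCount (PySem.Int.band (PySem.Int.bxor (PySem.Int.bor a b) c) mask) : Nat) : Int)
  + ((PySem.Int.bitCount (PySem.Int.band (PySem.Int.band (PySem.Int.band a b) (Int.not c)) mask) : Nat) : Int)

-- ===== PRECONDITION & SPEC =====
def Spec_min_flips (a : Int) (b : Int) (c : Int) (out : Int) : Prop := out = min_flips_alt a b c
instance (a : Int) (b : Int) (c : Int) (out : Int) : Decidable (Spec_min_flips a b c out) := by unfold Spec_min_flips; infer_instance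

-- ===== CLAIM (what is proved, stated in full; the proofs are below) =====
def Claim_equal_min_flips : Prop := ∀ (a : Int) (b : Int) (c : Int), Dom_min_flips a b c → Spec_min_flips a b c (min_flips a b c)

-- ===== LEMMAS AND PROOFS =====

theorem pv_bit0_val (x : Nat) : x % 2 = (x.testBit 0).toNat := by
  rcases Nat.mod_two_eq_zero_or_one x with h|h <;> simp [Nat.testBit_zero, h]

theorem pv_half_ldiff (a b : Nat) : (a.ldiff b) / 2 = (a / 2).ldiff (b / 2) := by
  apply Nat.eq_of_testBit_eq; intro i
  rw [← Nat.testBit_succ, Nat.testBit_ldiff, Nat.testBit_ldiff, Nat.testBit_succ, Nat.testBit_succ]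

theorem pv_half_land (a b : Nat) : (a &&& b) / 2 = (a / 2) &&& (b / 2) := by
  apply Nat.eq_of_testBit_eq; intro i
  rw [← Nat.testBit_succ, Nat.testBit_land, Nat.testBit_land, Nat.testBit_succ, Nat.testBit_succ]

-- disjoint bit decomposition of a Nat: clearing b's bits plus keeping them gives back a
theorem pv_ldiff_add_land (a b : Nat) : a.ldiff b + (a &&& b) = a := by
  induction a using Nat.strong_induction_on generalizing b with
  | _ a ih =>
  rcases Nat.eq_zero_or_pos a with rfl|ha
  · have hz : Nat.ldiff 0 b = 0 := Nat.eq_of_testBit_eq (by simp [Nat.testBit_ldiff])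
    simp [hz]
  · have h1 := ih (a / 2) (Nat.div_lt_self ha one_lt_two) (b / 2)
    have e1 : a.ldiff b = 2 * ((a / 2).ldiff (b / 2)) + ((a.ldiff b) % 2) := by
      rw [← pv_half_ldiff]; omega
    have e2 : (a &&& b) = 2 * ((a / 2) &&& (b / 2)) + ((a &&& b) % 2) := by
      rw [← pv_half_land]; omega
    have m1 : (a.ldiff b) % 2 = (a.testBit 0 && !b.testBit 0).toNat := by
      rw [pv_bit0_val, Nat.testBit_ldiff]
    have m2 : (a &&& b) % 2 = (a.testBit 0 && b.testBit 0).toNat := by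
      rw [pv_bit0_val, Nat.testBit_land]
    have m3 : a % 2 = (a.testBit 0).toNat := pv_bit0_val a
    have ha2 : a = 2 * (a / 2) + a % 2 := by omega
    cases h0 : a.testBit 0 <;> cases hb0 : b.testBit 0 <;>
      simp only [h0, hb0, Bool.toNat_false, Bool.toNat_true, Bool.not_false, Bool.not_true,
        Bool.and_false, Bool.and_true] at m1 m2 m3 <;> omega

theorem pv_sub_land (a b : Nat) : a - (a &&& b) = a.ldiff b := by
  have h := pv_ldiff_add_land a b
  omega

theorem pv_neg_cast (k : Nat) : (-(k : Int) - 1) = Int.negSucc k := by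
  rw [Int.negSucc_eq]; ring

theorem pv_not_nonneg_negSucc (n : Nat) : ¬ (0 : Int) ≤ Int.negSucc n := by
  have := Int.negSucc_lt_zero n; omega

theorem pv_neg_negSucc (n : Nat) : (-Int.negSucc n - 1) = (n : Int) := by
  rw [Int.negSucc_eq]; ring

theorem pv_tb_natCast (k : Nat) (i : Nat) : Int.testBit (k : Int) i = k.testBit i := rfl

theorem pv_tb_neg_cast (k : Nat) (i : Nat) : Int.testBit (-(k : Int) - 1) i = !k.testBit i := by
  rw [pv_neg_cast]; rfl

theorem pv_tb_negSucc (k : Nat) (i : Nat) : Int.testBit (Int.negSucc k) i = !k.testBit i := rfl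

-- testBit characterisations of PySem's Python-exact bitwise operators
theorem pv_tb_band (x y : Int) (i : Nat) :
    (PySem.Int.band x y).testBit i = (x.testBit i && y.testBit i) := by
  rcases x with m|m <;> rcases y with n|n <;>
    simp [PySem.Int.band, pv_not_nonneg_negSucc, pv_neg_negSucc, pv_sub_land,
      pv_tb_natCast, pv_tb_neg_cast, pv_tb_negSucc, Nat.testBit_ldiff, Nat.testBit_land,
      Bool.and_comm]

theorem pv_tb_bor (x y : Int) (i : Nat) :
    (PySem.Int.bor x y).testBit i = (x.testBit i || y.testBit i) := by
  rcases x with m|m <;> rcases y with n|n <;>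
    simp [PySem.Int.bor, pv_not_nonneg_negSucc, pv_neg_negSucc, pv_sub_land,
      pv_tb_natCast, pv_tb_neg_cast, pv_tb_negSucc, Nat.testBit_ldiff, Nat.testBit_lor,
      Bool.or_comm]

theorem pv_tb_bxor (x y : Int) (i : Nat) :
    (PySem.Int.bxor x y).testBit i = (x.testBit i ^^ y.testBit i) := by
  rcases x with m|m <;> rcases y with n|n <;>
    simp [PySem.Int.bxor, pv_not_nonneg_negSucc, pv_neg_negSucc,
      pv_tb_natCast, pv_tb_neg_cast, pv_tb_negSucc, Nat.testBit_xor, Bool.xor_comm]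

theorem pv_tb_not (x : Int) (i : Nat) : (Int.not x).testBit i = !x.testBit i := by
  cases x <;> simp [Int.not, Int.testBit]

-- masking with 2^32-1 yields a Nat below 2^32 carrying exactly x's low 32 bits
theorem pv_band_mask (x : Int) :
    ∃ m : Nat, PySem.Int.band x 4294967295 = (m : Int) ∧ m < 2 ^ 32 ∧
      ∀ i, m.testBit i = (x.testBit i && decide (i < 32)) := by
  have hM : (4294967295 : Int) = ((4294967295 : Nat) : Int) := by norm_num
  have key : ∀ m : Nat, PySem.Int.band x 4294967295 = (m : Int) →
      ∀ i, m.testBit i = (x.testBit i && decide (i < 32)) := by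
    intro m hv i
    have h := pv_tb_band x 4294967295 i
    rw [hv, pv_tb_natCast] at h
    rw [h, hM, pv_tb_natCast]
    have h32 : (4294967295 : Nat) = 2 ^ 32 - 1 := by norm_num
    rw [h32, Nat.testBit_two_pow_sub_one]
  rcases x with m|m
  · refine ⟨m &&& 4294967295, ?_, ?_, ?_⟩
    · rw [hM]; show PySem.Int.band ((m : Nat) : Int) _ = _
      rw [PySem.Int.band_natCast]
    · have : m &&& 4294967295 ≤ 4294967295 := Nat.and_le_right
      omega
    · exact fun i => key _ (by rw [hM]; show PySem.Int.band ((m : Nat) : Int) _ = _; rw [PySem.Int.band_natCast]) i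
  · have hv : PySem.Int.band (Int.negSucc m) 4294967295 = ((Nat.ldiff 4294967295 m : Nat) : Int) := by
      simp [PySem.Int.band, pv_not_nonneg_negSucc, pv_neg_negSucc, pv_sub_land]
    refine ⟨_, hv, ?_, key _ hv⟩
    have := pv_ldiff_add_land 4294967295 m
    omega

-- bit_count of a Nat below 2^k is the sum of its first k bits
theorem pv_bitCount_sum (k : Nat) : ∀ m : Nat, m < 2 ^ k →
    ((PySem.Int.bitCount (m : Int) : Nat) : Int) = ∑ i ∈ Finset.range k, ((m.testBit i).toNat : Int) := by
  induction k with
  | zero =>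
    intro m hm
    interval_cases m
    simp [PySem.Int.bitCount_natCast_zero]
  | succ k ih =>
    intro m hm
    rcases Nat.eq_zero_or_pos m with rfl|hpos
    · simp [PySem.Int.bitCount_natCast_zero, Nat.zero_testBit]
    · rw [PySem.Int.bitCount_natCast hpos]
      have h2 : m / 2 < 2 ^ k := by omega
      have hs := ih (m / 2) h2
      rw [Finset.sum_range_succ']
      simp only [Nat.testBit_succ]
      rw [← hs]
      have : m % 2 = (m.testBit 0).toNat := pv_bit0_val m
      push_cast
      omega

-- the bit A's loop extracts, as a function of testBit
theorem pv_bitterm (x : Int) (k : Nat) :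
    PySem.Int.band (x >>> k) 1 = if x.testBit k then (1 : Int) else 0 := by
  rcases x with m|m
  · show PySem.Int.band ((Int.ofNat (m >>> k))) 1 = _
    rw [PySem.Int.band_one, PySem.Int.mod_eq_emod_of_pos (by norm_num)]
    have ht : Int.testBit (Int.ofNat m) k = decide ((m >>> k) % 2 = 1) := by
      show m.testBit k = _
      simp [Nat.testBit, Nat.one_and_eq_mod_two]
    rw [ht]
    show ((((m >>> k : Nat)) : Int)) % 2 = _
    rcases Nat.mod_two_eq_zero_or_one (m >>> k) with h|h
    · rw [show (decide ((m >>> k) % 2 = 1) : Bool) = false by simp [h]]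
      show ((m >>> k : Nat) : Int) % 2 = 0
      omega
    · rw [show (decide ((m >>> k) % 2 = 1) : Bool) = true by simp [h]]
      show ((m >>> k : Nat) : Int) % 2 = 1
      omega
  · show PySem.Int.band (Int.negSucc (m >>> k)) 1 = _
    rw [PySem.Int.band_one, PySem.Int.mod_eq_emod_of_pos (by norm_num)]
    have ht : Int.testBit (Int.negSucc m) k = !decide ((m >>> k) % 2 = 1) := by
      show (!m.testBit k) = _
      simp [Nat.testBit, Nat.one_and_eq_mod_two]
    rw [ht]
    have hns : (Int.negSucc (m >>> k)) = -((m >>> k : Nat) : Int) - 1 := by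
      rw [Int.negSucc_eq]; ring
    rw [hns]
    rcases Nat.mod_two_eq_zero_or_one (m >>> k) with h|h
    · rw [show (decide ((m >>> k) % 2 = 1) : Bool) = false by simp [h]]
      show (-((m >>> k : Nat) : Int) - 1) % 2 = 1
      omega
    · rw [show (decide ((m >>> k) % 2 = 1) : Bool) = true by simp [h]]
      show (-((m >>> k : Nat) : Int) - 1) % 2 = 0
      omega

-- Python's i-th loop shift with the Int-typed exponent the port elaborates to
theorem pv_shift_int (x : Int) (k : Nat) : x >>> ((k : Nat) : Int) = x >>> k := by
  rcases x with m|m <;> cases k <;> rfl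

theorem pv_list_sum_range (n : Nat) (f : Nat → Int) :
    ((List.range n).map f).sum = ∑ i ∈ Finset.range n, f i := by
  induction n with
  | zero => simp
  | succ n ih => rw [List.range_succ, Finset.sum_range_succ, List.map_append, List.sum_append, ih]; simp

def pvTermA (p q r : Bool) : Int :=
  if r then (if !p && !q then 1 else 0) else ((p.toNat : Int) + (q.toNat : Int))

def pvTermA' (a b c : Int) (x : Int) : Int :=
  if PySem.Int.band (c >>> ((x.toNat : Nat) : Int)) 1 = 0 then
    PySem.Int.band (a >>> ((x.toNat : Nat) : Int)) 1 + PySem.Int.band (b >>> ((x.toNat : Nat) : Int)) 1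
  else if PySem.Int.band (a >>> ((x.toNat : Nat) : Int)) 1 = 0 ∧ PySem.Int.band (b >>> ((x.toNat : Nat) : Int)) 1 = 0 then 1 else 0

theorem pv_A_fold (a b c : Int) (l : List Int) (init : Int) :
    l.foldl (fun flip_count bit_position =>
      let bit_a := PySem.Int.band (a >>> bit_position.toNat) 1
      let bit_b := PySem.Int.band (b >>> bit_position.toNat) 1
      let bit_c := PySem.Int.band (c >>> bit_position.toNat) 1
      if bit_c = 0 then flip_count + (bit_a + bit_b)
      else flip_count + (if bit_a = 0 ∧ bit_b = 0 then 1 else 0)) init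
    = init + (l.map (pvTermA' a b c)).sum := by
  induction l generalizing init with
  | nil => simp
  | cons y t ih =>
    rw [List.foldl_cons, ih, List.map_cons, List.sum_cons]
    unfold pvTermA'
    by_cases h : PySem.Int.band (c >>> ((y.toNat : Nat) : Int)) 1 = 0 <;>
      simp only [h, if_true, if_false, reduceIte, not_false_iff] <;> ring

theorem pv_A_sum (a b c : Int) :
    min_flips a b c = ∑ i ∈ Finset.range 32, pvTermA (a.testBit i) (b.testBit i) (c.testBit i) := by
  unfold min_flips
  have hr : PySem.List.pyRange 0 32 1 = List.map (fun k : Nat => (k : Int)) (List.range 32) := by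
    decide
  rw [hr, pv_A_fold, zero_add, List.map_map, pv_list_sum_range 32 (pvTermA' a b c ∘ fun k : Nat => (k : Int))]
  apply Finset.sum_congr rfl
  intro i _
  simp only [Function.comp_apply, pvTermA', Int.toNat_natCast, pv_shift_int, pv_bitterm]
  cases c.testBit i <;> cases a.testBit i <;> cases b.testBit i <;> simp [pvTermA]

theorem pv_B_sum (a b c : Int) :
    min_flips_alt a b c = ∑ i ∈ Finset.range 32,
      ((((a.testBit i || b.testBit i) ^^ c.testBit i).toNat : Int)
        + (((a.testBit i && b.testBit i) && !c.testBit i).toNat : Int)) := by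
  have hm : ((1 : Int) <<< (32 : Nat)) - 1 = 4294967295 := by decide
  show ((PySem.Int.bitCount (PySem.Int.band (PySem.Int.bxor (PySem.Int.bor a b) c) (((1 : Int) <<< (32 : Nat)) - 1)) : Nat) : Int)
      + ((PySem.Int.bitCount (PySem.Int.band (PySem.Int.band (PySem.Int.band a b) (Int.not c)) (((1 : Int) <<< (32 : Nat)) - 1)) : Nat) : Int) = _
  rw [hm]
  obtain ⟨m1, hv1, hlt1, ht1⟩ := pv_band_mask (PySem.Int.bxor (PySem.Int.bor a b) c)
  obtain ⟨m2, hv2, hlt2, ht2⟩ := pv_band_mask (PySem.Int.band (PySem.Int.band a b) (Int.not c))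
  rw [hv1, hv2, pv_bitCount_sum 32 m1 hlt1, pv_bitCount_sum 32 m2 hlt2, ← Finset.sum_add_distrib]
  apply Finset.sum_congr rfl
  intro i hi
  have hi32 : i < 32 := Finset.mem_range.mp hi
  rw [ht1 i, ht2 i, pv_tb_bxor, pv_tb_bor, pv_tb_band, pv_tb_band, pv_tb_not]
  simp [hi32]

theorem pv_perbit (p q r : Bool) :
    pvTermA p q r = (((p || q) ^^ r).toNat : Int) + (((p && q) && !r).toNat : Int) := by
  cases p <;> cases q <;> cases r <;> rfl

-- ===== VERDICT (by name: the statement is the Claim_ definition above) =====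
theorem min_flips_spec : Claim_equal_min_flips := by
  intro a b c _
  unfold Spec_min_flips
  rw [pv_A_sum, pv_B_sum]
  exact Finset.sum_congr rfl fun i _ => pv_perbit _ _ _
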